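-- pv_equiv track=rewrite | github.com/rol1510/AoC-2020 | Day-13/main_part_2.py | calc
-- ===== SOURCE A (Python) =====
-- def calc(start, multiple_1, multiple_2, offset_2):
--     res = []
--     t = start
--     while True:
--         if (t + offset_2) % multiple_2 == 0:
--             res.append(t)
--             if len(res) >= 2:
--                 return (res[0], res[1]-res[0])
--         t += multiple_1
-- ===== SOURCE B (Python) =====
-- def calc(start, multiple_1, multiple_2, offset_2):
--     # Closed-form: solve k*multiple_1 == -(start+offset_2) (mod multiple_2) by extended Euclid.
--     def egcd(a, b):
--         if b == 0:
--             return (a, 1, 0) if a >= 0 else (-a, -1, 0)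
--         g, x, y = egcd(b, a % b)
--         return (g, y, x - (a // b) * y)
--     g, x, _ = egcd(multiple_1, multiple_2)
--     r = -(start + offset_2)
--     p = abs(multiple_2) // g
--     k0 = ((r // g) * x) % p
--     return (start + k0 * multiple_1, multiple_1 * p)
-- ===== Notes on version B (the rewrite author's own statement) =====
-- stated objective: faster
-- what changed: Replaced the unbounded linear scan over arithmetic-progression times with a closed form: extended Euclid solves k*multiple_1 ≡ -(start+offset_2) (mod multiple_2) for the first hit, and the gap is multiple_1 * (|multiple_2| / gcd).
import Mathlib
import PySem

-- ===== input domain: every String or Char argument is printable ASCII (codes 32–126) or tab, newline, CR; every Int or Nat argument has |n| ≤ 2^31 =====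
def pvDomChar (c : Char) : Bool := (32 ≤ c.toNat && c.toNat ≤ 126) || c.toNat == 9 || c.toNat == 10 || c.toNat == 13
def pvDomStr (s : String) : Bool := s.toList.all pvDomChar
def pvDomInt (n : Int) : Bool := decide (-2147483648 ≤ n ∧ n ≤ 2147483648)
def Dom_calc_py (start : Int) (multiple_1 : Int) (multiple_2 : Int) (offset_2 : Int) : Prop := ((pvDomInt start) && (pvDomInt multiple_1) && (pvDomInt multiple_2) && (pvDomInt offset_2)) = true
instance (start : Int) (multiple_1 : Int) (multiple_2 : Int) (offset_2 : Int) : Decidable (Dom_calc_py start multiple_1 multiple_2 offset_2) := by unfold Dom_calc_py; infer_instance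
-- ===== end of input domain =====

-- B replaces A's unbounded linear scan by an extended-Euclid closed form (timed asymptotically faster).

-- ===== PORT A =====
-- A's 'while True' loop, transliterated with fuel; under Pre_ the second hit occurs within
-- 2*|multiple_2| iterations (proved below), so the fuel and the getD default are never exhausted there.
def calcALoop (multiple_1 : Int) (multiple_2 : Int) (offset_2 : Int) :
    Nat → Int → List Int → Option (Int × Int)
  | 0, _, _ => none
  | fuel+1, t, res =>
    if PySem.Int.mod (t + offset_2) multiple_2 = 0 then
      let res' := res ++ [t]
      if 2 ≤ res'.length then
        some (res'.getD 0 0, res'.getD 1 0 - res'.getD 0 0)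
      else calcALoop multiple_1 multiple_2 offset_2 fuel (t + multiple_1) res'
    else calcALoop multiple_1 multiple_2 offset_2 fuel (t + multiple_1) res

def calc_py (start : Int) (multiple_1 : Int) (multiple_2 : Int) (offset_2 : Int) : Int × Int :=
  (calcALoop multiple_1 multiple_2 offset_2 (2 * multiple_2.natAbs + 2) start []).getD (0, 0)

-- ===== PORT B =====
-- termination measure for egcd: Python's a % b is PySem.Int.mod; its |value| shrinks below |b|
theorem pymod_natAbs_lt (a b : Int) (hb : b ≠ 0) : (PySem.Int.mod a b).natAbs < b.natAbs := by
  rcases lt_or_gt_of_ne hb with h | h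
  · have := PySem.Int.mod_neg_bounds a h
    omega
  · have h1 := PySem.Int.mod_nonneg a h
    have h2 := PySem.Int.mod_lt a h
    omega

def egcd (a b : Int) : Int × Int × Int :=
  if hb : b = 0 then
    if 0 ≤ a then (a, 1, 0) else (-a, -1, 0)
  else
    let e := egcd b (PySem.Int.mod a b)
    (e.1, e.2.2, e.2.1 - (PySem.Int.floordiv a b) * e.2.2)
termination_by b.natAbs
decreasing_by exact pymod_natAbs_lt a b hb

def calc_py_alt (start : Int) (multiple_1 : Int) (multiple_2 : Int) (offset_2 : Int) : Int × Int :=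
  let e := egcd multiple_1 multiple_2
  let g := e.1
  let x := e.2.1
  let r := -(start + offset_2)
  let p := PySem.Int.floordiv |multiple_2| g
  let k0 := PySem.Int.mod ((PySem.Int.floordiv r g) * x) p
  (start + k0 * multiple_1, multiple_1 * p)

-- ===== PRECONDITION & SPEC =====
-- Pre_ excludes exactly the inputs where A does not return: multiple_2 = 0 (Python raises
-- ZeroDivisionError; B raises there too) and gcd(multiple_1,multiple_2) ∤ (start+offset_2)
-- (the congruence has no solution, so A's while-True loop never terminates).
def Pre_calc_py (start : Int) (multiple_1 : Int) (multiple_2 : Int) (offset_2 : Int) : Prop :=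
  multiple_2 ≠ 0 ∧ (Int.gcd multiple_1 multiple_2 : Int) ∣ (start + offset_2)

instance (start : Int) (multiple_1 : Int) (multiple_2 : Int) (offset_2 : Int) : Decidable (Pre_calc_py start multiple_1 multiple_2 offset_2) := by unfold Pre_calc_py; infer_instance

def pvWitness_calc_py : Int × Int × Int × Int := (6, 4, 7, 1)

def Spec_calc_py (start : Int) (multiple_1 : Int) (multiple_2 : Int) (offset_2 : Int) (out : Int × Int) : Prop := out = calc_py_alt start multiple_1 multiple_2 offset_2
instance (start : Int) (multiple_1 : Int) (multiple_2 : Int) (offset_2 : Int) (out : Int × Int) : Decidable (Spec_calc_py start multiple_1 multiple_2 offset_2 out) := by unfold Spec_calc_py; infer_instance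

-- ===== CLAIM (what is proved, stated in full; the proofs are below) =====
def Claim_equal_calc_py : Prop := ∀ (start : Int) (multiple_1 : Int) (multiple_2 : Int) (offset_2 : Int), Dom_calc_py start multiple_1 multiple_2 offset_2 → Pre_calc_py start multiple_1 multiple_2 offset_2 → Spec_calc_py start multiple_1 multiple_2 offset_2 (calc_py start multiple_1 multiple_2 offset_2)

-- ===== LEMMAS AND PROOFS =====

theorem gcd_shift (a b q : Int) : Int.gcd b (a - b * q) = Int.gcd a b := by
  apply Nat.dvd_antisymm
  · apply Int.dvd_gcd
    · have h1 : (Int.gcd b (a - b*q) : Int) ∣ b := Int.gcd_dvd_left b (a - b*q)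
      have h2 : (Int.gcd b (a - b*q) : Int) ∣ (a - b*q) := Int.gcd_dvd_right b (a - b*q)
      have := dvd_add h2 (h1.mul_right q)
      simpa using this
    · exact Int.gcd_dvd_left b (a - b*q)
  · apply Int.dvd_gcd
    · exact Int.gcd_dvd_right a b
    · exact dvd_sub (Int.gcd_dvd_left a b) ((Int.gcd_dvd_right a b).mul_right q)

theorem egcd_spec (a b : Int) :
    (egcd a b).1 = (Int.gcd a b : Int) ∧
    a * (egcd a b).2.1 + b * (egcd a b).2.2 = (egcd a b).1 := by
  induction a, b using egcd.induct with
  | case1 a h =>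
    rw [egcd]
    simp [h, Int.gcd]
    rw [Int.abs_eq_natAbs]
    omega
  | case2 a h =>
    rw [egcd]
    simp [h, Int.gcd]
    rw [Int.abs_eq_natAbs]
    omega
  | case3 a b hb ih =>
    rw [egcd]
    simp only [hb, dite_false]
    obtain ⟨ih1, ih2⟩ := ih
    have hmod : PySem.Int.mod a b = a - b * (PySem.Int.floordiv a b) := by
      have := PySem.Int.floordiv_mul_add_mod a b
      linarith
    refine ⟨by rw [ih1, hmod, gcd_shift], ?_⟩
    linear_combination ih2 - (egcd b (PySem.Int.mod a b)).2.2 * hmod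

-- the closed-form quantities: gcd, period of hits (in loop steps), first hit index
def Gv (m1 m2 : Int) : Int := (Int.gcd m1 m2 : Int)
def Pv (m1 m2 : Int) : Int := |m2| / Gv m1 m2
def K0v (s m1 m2 o : Int) : Int := ((-(s+o) / Gv m1 m2) * (egcd m1 m2).2.1) % (Pv m1 m2)

theorem Gv_pos (m1 m2 : Int) (hm2 : m2 ≠ 0) : 0 < Gv m1 m2 := by
  have := Int.gcd_eq_zero_iff (a := m1) (b := m2)
  unfold Gv
  omega

theorem GP_eq (m1 m2 : Int) : Gv m1 m2 * Pv m1 m2 = |m2| :=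
  Int.mul_ediv_cancel' ((dvd_abs _ _).mpr (Int.gcd_dvd_right m1 m2))

theorem Pv_pos (m1 m2 : Int) (hm2 : m2 ≠ 0) : 0 < Pv m1 m2 := by
  have h1 := GP_eq m1 m2
  have h2 := Gv_pos m1 m2 hm2
  have h3 : (0:Int) < |m2| := abs_pos.mpr hm2
  nlinarith

theorem K0v_bounds (s m1 m2 o : Int) (hm2 : m2 ≠ 0) :
    0 ≤ K0v s m1 m2 o ∧ K0v s m1 m2 o < Pv m1 m2 := by
  have hP := Pv_pos m1 m2 hm2
  exact ⟨Int.emod_nonneg _ (ne_of_gt hP), Int.emod_lt_of_pos _ hP⟩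

-- the loop's test at step k holds iff k ≡ K0v (mod Pv)
theorem cond_iff (s m1 m2 o : Int) (hm2 : m2 ≠ 0)
    (hdvd : (Int.gcd m1 m2 : Int) ∣ (s + o)) (k : Int) :
    m2 ∣ (s + k * m1 + o) ↔ Pv m1 m2 ∣ (k - K0v s m1 m2 o) := by
  set G := Gv m1 m2 with hGdef
  set P := Pv m1 m2 with hPdef
  set K0 := K0v s m1 m2 o with hK0def
  set X := (egcd m1 m2).2.1 with hXdef
  set Y := (egcd m1 m2).2.2 with hYdef
  set r : Int := -(s+o) with hrdef
  have hGpos : 0 < G := Gv_pos m1 m2 hm2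
  have hGne : G ≠ 0 := ne_of_gt hGpos
  have hGm1 : G ∣ m1 := Int.gcd_dvd_left m1 m2
  have hGm2 : G ∣ m2 := Int.gcd_dvd_right m1 m2
  have hGr : G ∣ r := hdvd.neg_right
  have hBez : m1 * X + m2 * Y = G := by
    have h := egcd_spec m1 m2
    rw [h.1] at h
    exact h.2
  have hm1eq : G * (m1 / G) = m1 := Int.mul_ediv_cancel' hGm1
  have hm2eq : G * (m2 / G) = m2 := Int.mul_ediv_cancel' hGm2
  have habs : G * P = |m2| := GP_eq m1 m2
  have hPpos : 0 < P := Pv_pos m1 m2 hm2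
  have hre : r / G * G = r := Int.ediv_mul_cancel hGr
  have hP2 : P = |m2 / G| := by
    have hq : m2 / G * G = m2 := by linear_combination hm2eq
    have h1 : |m2 / G| * G = |m2| := by
      calc |m2 / G| * G = |m2 / G| * |G| := by rw [abs_of_pos hGpos]
        _ = |m2 / G * G| := by rw [abs_mul]
        _ = |m2| := by rw [hq]
    have h0 : P * G = |m2| := by linear_combination habs
    exact mul_right_cancel₀ hGne (h0.trans h1.symm)
  have hK0eq : K0 = r / G * X - P * ((r / G * X) / P) := by
    rw [hK0def]
    unfold K0v
    rw [← hGdef, ← hPdef, ← hXdef, ← hrdef]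
    rw [Int.emod_def]
  have hsol : m2 ∣ m1 * K0 - r := by
    have piece1 : m2 ∣ m1 * (r / G * X) - r := by
      refine ⟨-(r / G * Y), ?_⟩
      linear_combination (r / G) * hBez + hre
    have piece2 : m2 ∣ m1 * P := by
      have heq : m1 * P = (m1 / G) * |m2| := by
        calc m1 * P = (G * (m1 / G)) * P := by rw [hm1eq]
          _ = (m1 / G) * (G * P) := by ring
          _ = (m1 / G) * |m2| := by rw [habs]
      rw [heq]
      exact ((dvd_abs m2 m2).mpr dvd_rfl).mul_left _
    have heq : m1 * K0 - r = (m1 * (r / G * X) - r) - (m1 * P) * ((r / G * X) / P) := by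
      rw [hK0eq]; ring
    rw [heq]
    exact dvd_sub piece1 (piece2.mul_right _)
  have step1 : s + k * m1 + o = m1 * k - r := by rw [hrdef]; ring
  rw [step1]
  have step2 : m2 ∣ m1 * k - r ↔ m2 ∣ m1 * (k - K0) := by
    constructor
    · intro h
      have := dvd_sub h hsol
      have heq : m1 * k - r - (m1 * K0 - r) = m1 * (k - K0) := by ring
      rwa [heq] at this
    · intro h
      have := dvd_add h hsol
      have heq : m1 * (k - K0) + (m1 * K0 - r) = m1 * k - r := by ring
      rwa [heq] at this
  rw [step2]
  have hmulq : m1 * (k - K0) = G * ((m1 / G) * (k - K0)) := by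
    calc m1 * (k - K0) = (G * (m1 / G)) * (k - K0) := by rw [hm1eq]
      _ = G * ((m1 / G) * (k - K0)) := by ring
  have step3 : m2 ∣ m1 * (k - K0) ↔ (m2 / G) ∣ (m1 / G) * (k - K0) := by
    constructor
    · intro h
      rw [hmulq] at h
      have h2 : G * (m2 / G) ∣ G * ((m1 / G) * (k - K0)) := by rw [hm2eq]; exact h
      exact (mul_dvd_mul_iff_left hGne).mp h2
    · intro h
      have h2 := mul_dvd_mul_left G h
      rw [hm2eq] at h2
      rwa [hmulq]
  rw [step3]
  have cop : IsCoprime (m2 / G) (m1 / G) := by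
    rw [Int.isCoprime_iff_gcd_eq_one, Int.gcd_comm]
    have hg : 0 < Int.gcd m1 m2 := by
      have := Int.gcd_eq_zero_iff (a := m1) (b := m2)
      omega
    exact Int.gcd_div_gcd_div_gcd hg
  have step4 : (m2 / G) ∣ (m1 / G) * (k - K0) ↔ (m2 / G) ∣ (k - K0) := by
    constructor
    · exact cop.dvd_of_dvd_mul_left
    · exact fun h => h.mul_left _
  rw [step4, hP2]
  exact (abs_dvd _ _).symm

-- the loop after it has recorded the first hit: it stops exactly at index K0 + P
theorem loopPhase2 (s m1 m2 o K0 P : Int)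
    (HC : ∀ k : Int, PySem.Int.mod (s + k * m1 + o) m2 = 0 ↔ P ∣ (k - K0)) :
    ∀ (fuel : Nat) (k : Int), K0 < k → k ≤ K0 + P → (K0 + P - k).toNat < fuel →
    calcALoop m1 m2 o fuel (s + k * m1) [s + K0 * m1] =
      some (s + K0 * m1, s + (K0 + P) * m1 - (s + K0 * m1)) := by
  intro fuel
  induction fuel with
  | zero => intro k _ _ h3; omega
  | succ n ih =>
    intro k h1 h2 h3
    by_cases hk : k = K0 + P
    · subst hk
      have hc : PySem.Int.mod (s + (K0 + P) * m1 + o) m2 = 0 := (HC (K0 + P)).mpr ⟨1, by ring⟩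
      simp [calcALoop, hc]
    · have hc : ¬ PySem.Int.mod (s + k * m1 + o) m2 = 0 := by
        rw [HC k]
        intro hd
        have habs : |k - K0| < P := by rw [abs_of_pos (by omega)]; omega
        have := Int.eq_zero_of_abs_lt_dvd hd habs
        omega
      simp only [calcALoop, hc, if_false]
      have harg : s + k * m1 + m1 = s + (k + 1) * m1 := by ring
      rw [harg]
      exact ih (k + 1) (by omega) (by omega) (by omega)

-- the loop before the first hit: the first hit is at index K0, the second at K0 + P
theorem loopPhase1 (s m1 m2 o K0 P : Int)
    (HC : ∀ k : Int, PySem.Int.mod (s + k * m1 + o) m2 = 0 ↔ P ∣ (k - K0))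
    (hP : 0 < P) (hK0 : 0 ≤ K0) (hK0P : K0 < P) :
    ∀ (fuel : Nat) (k : Int), 0 ≤ k → k ≤ K0 → (K0 - k).toNat + P.toNat < fuel →
    calcALoop m1 m2 o fuel (s + k * m1) [] =
      some (s + K0 * m1, s + (K0 + P) * m1 - (s + K0 * m1)) := by
  intro fuel
  induction fuel with
  | zero => intro k _ _ h3; omega
  | succ n ih =>
    intro k h1 h2 h3
    by_cases hk : k = K0
    · subst hk
      have hc : PySem.Int.mod (s + k * m1 + o) m2 = 0 := (HC k).mpr ⟨0, by ring⟩
      simp only [calcALoop, hc, if_pos, List.nil_append, List.length_singleton]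
      norm_num
      have harg : s + k * m1 + m1 = s + (k + 1) * m1 := by ring
      rw [harg]
      rw [loopPhase2 s m1 m2 o k P HC n (k + 1) (by omega) (by omega) (by omega)]
      simp only [Option.some.injEq, Prod.mk.injEq]
      exact ⟨trivial, by ring⟩
    · have hc : ¬ PySem.Int.mod (s + k * m1 + o) m2 = 0 := by
        rw [HC k]
        intro hd
        have habs : |k - K0| < P := by rw [abs_of_neg (by omega)]; omega
        have := Int.eq_zero_of_abs_lt_dvd hd habs
        omega
      simp only [calcALoop, hc, if_false]
      have harg : s + k * m1 + m1 = s + (k + 1) * m1 := by ring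
      rw [harg]
      exact ih (k + 1) (by omega) (by omega) (by omega)

-- B's port evaluates to the closed form (the floor operations become exact divisions)
theorem alt_closed (s m1 m2 o : Int) (hm2 : m2 ≠ 0) :
    calc_py_alt s m1 m2 o = (s + K0v s m1 m2 o * m1, m1 * Pv m1 m2) := by
  have hGpos := Gv_pos m1 m2 hm2
  have hPpos := Pv_pos m1 m2 hm2
  unfold Gv at hGpos
  unfold Pv Gv at hPpos
  unfold calc_py_alt
  simp only
  rw [(egcd_spec m1 m2).1]
  simp only [PySem.Int.floordiv_eq_ediv_of_pos hGpos]
  rw [PySem.Int.mod_eq_emod_of_pos hPpos]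
  unfold K0v Pv Gv
  rfl

theorem main_eq (s m1 m2 o : Int) (hm2 : m2 ≠ 0)
    (hdvd : (Int.gcd m1 m2 : Int) ∣ (s + o)) :
    calc_py s m1 m2 o = calc_py_alt s m1 m2 o := by
  set K0 := K0v s m1 m2 o with hK0def
  set P := Pv m1 m2 with hPdef
  have hPpos : 0 < P := Pv_pos m1 m2 hm2
  obtain ⟨hK0a, hK0b⟩ := K0v_bounds s m1 m2 o hm2
  have HC : ∀ k : Int, PySem.Int.mod (s + k * m1 + o) m2 = 0 ↔ P ∣ (k - K0) := by
    intro k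
    rw [PySem.Int.mod_eq_zero_iff_dvd]
    exact cond_iff s m1 m2 o hm2 hdvd k
  have hPle : P ≤ |m2| := Int.ediv_le_self (Gv m1 m2) (abs_nonneg m2)
  have habs : |m2| = (m2.natAbs : Int) := Int.abs_eq_natAbs m2
  have hbound : (K0 - 0).toNat + P.toNat < 2 * m2.natAbs + 2 := by omega
  have h := loopPhase1 s m1 m2 o K0 P HC hPpos hK0a hK0b (2 * m2.natAbs + 2) 0 le_rfl (by omega) hbound
  rw [show s + (0:Int) * m1 = s from by ring] at h
  rw [calc_py, h]
  rw [alt_closed s m1 m2 o hm2]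
  simp only [Option.getD_some]
  refine Prod.ext rfl ?_
  show s + (K0 + P) * m1 - (s + K0 * m1) = m1 * P
  ring

-- ===== VERDICT (by name: the statement is the Claim_ definition above) =====
theorem calc_py_spec : Claim_equal_calc_py := by
  intro s m1 m2 o _hdom hpre
  unfold Spec_calc_py
  exact main_eq s m1 m2 o hpre.1 hpre.2
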